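-- pv_equiv track=rewrite | github.com/Diana296/project | index2.py | get_file_extension
-- ===== SOURCE A (Python) =====
-- def get_file_extension(filename):
--     """
--     Принимает имя файла
--     Возвращает расширение файла
--     Если найдена папка, то функция вернёт 'other folders'
--     """
--     pos = None
--     for i in range(0, len(filename)):
--         if filename[i] == '.':
--             pos = i
--     if pos is None:
--         return "other folders"
--     return filename[pos:: 1]
-- ===== SOURCE B (Python) =====
-- def get_file_extension(filename):
--     for i in range(len(filename) - 1, -1, -1):
--         if filename[i] == '.':
--             return filename[i:]
--     return "other folders"
-- ===== Notes on version B (the rewrite author's own statement) =====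
-- stated objective: alternative
-- what changed: B scans backward from the end and returns at the first dot it meets, instead of A's forward full scan that keeps overwriting a last-seen dot index and slices afterwards.
import Mathlib
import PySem

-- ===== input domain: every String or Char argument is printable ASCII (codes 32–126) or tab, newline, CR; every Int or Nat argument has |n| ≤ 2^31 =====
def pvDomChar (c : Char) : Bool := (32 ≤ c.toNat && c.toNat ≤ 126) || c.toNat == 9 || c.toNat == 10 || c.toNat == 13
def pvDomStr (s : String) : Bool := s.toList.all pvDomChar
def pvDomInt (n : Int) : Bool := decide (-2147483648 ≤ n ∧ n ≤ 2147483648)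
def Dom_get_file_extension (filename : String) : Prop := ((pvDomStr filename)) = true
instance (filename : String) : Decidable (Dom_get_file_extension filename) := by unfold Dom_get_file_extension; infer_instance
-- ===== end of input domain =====

-- B replaces A's forward scan (which overwrites a last-seen dot index, then slices) with a
-- backward scan returning at the first dot from the end; same cost, different traversal.

-- ===== PORT A =====
-- forward loop: for i in range(0, len(filename)): if filename[i] == '.': pos = i
def get_file_extension (filename : String) : String :=
  let pos : Option Int :=
    (PySem.List.pyRange 0 (PySem.Str.len filename) 1).foldl
      (fun p i => if PySem.Str.pyGet? filename i = some '.' then some i else p) none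
  match pos with
  | none => "other folders"
  -- filename[pos::1]: a step-1 slice is the plain slice filename[pos:]
  | some p => PySem.Str.slice filename (some p) none

-- ===== PORT B =====
-- backward loop: for i in range(len(filename)-1, -1, -1), returning filename[i:] at the first dot
def altScan (filename : String) : Nat → String
  | 0 => "other folders"
  | i + 1 =>
    if PySem.Str.pyGet? filename ((i : Nat) : Int) = some '.' then
      PySem.Str.slice filename (some ((i : Nat) : Int)) none
    else
      altScan filename i

def get_file_extension_alt (filename : String) : String :=
  altScan filename (PySem.Str.len filename).toNat

-- ===== PRECONDITION & SPEC =====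
def Spec_get_file_extension (filename : String) (out : String) : Prop := out = get_file_extension_alt filename
instance (filename : String) (out : String) : Decidable (Spec_get_file_extension filename out) := by unfold Spec_get_file_extension; infer_instance

-- ===== CLAIM (what is proved, stated in full; the proofs are below) =====
def Claim_equal_get_file_extension : Prop := ∀ (filename : String), Dom_get_file_extension filename → Spec_get_file_extension filename (get_file_extension filename)

-- ===== LEMMAS AND PROOFS =====

theorem altScan_eq_fold (filename : String) (n : Nat) :
    (match (PySem.List.pyRange 0 (n : Int) 1).foldl
        (fun p i => if PySem.Str.pyGet? filename i = some '.' then some i else p)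
        (none : Option Int) with
      | none => "other folders"
      | some p => PySem.Str.slice filename (some p) none)
    = altScan filename n := by
  induction n with
  | zero => simp [PySem.List.pyRange, altScan]
  | succ k ih =>
    have h : ((k : Int) + 1) = ((k + 1 : Nat) : Int) := by push_cast; ring
    rw [altScan, ← h, PySem.List.pyRange_one_succ_right (by exact_mod_cast Nat.zero_le k),
      List.foldl_append]
    simp only [List.foldl_cons, List.foldl_nil]
    by_cases hd : filename.toList[k]? = some '.' <;> simp_all

-- ===== VERDICT (by name: the statement is the Claim_ definition above) =====
theorem get_file_extension_spec : Claim_equal_get_file_extension := by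
  intro filename _
  unfold Spec_get_file_extension get_file_extension get_file_extension_alt
  have hlen : PySem.Str.len filename = ((filename.toList.length : Nat) : Int) := by
    simp [PySem.Str.len_eq]
  rw [hlen, Int.toNat_natCast]
  exact altScan_eq_fold filename filename.toList.length
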